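-- pv_equiv track=rewrite | github.com/tsubasa283paris/discord_the_array_book | source/aap/player.py | cycle_until
-- ===== SOURCE A (Python) =====
-- def cycle_until(l: list, v: any) -> list:
--     key_i = -1
--     for i in range(len(l)):
--         if l[i] == v:
--             key_i = i
--             break
--     if key_i < 0:
--         raise ValueError()
--     return l[key_i:] + l[:key_i]
-- ===== SOURCE B (Python) =====
-- def cycle_until(l: list, v: any) -> list:
--     found = False
--     head = []
--     tail = []
--     for x in l:
--         if found or x == v:
--             found = True
--             head.append(x)
--         else:
--             tail.append(x)
--     if not found:
--         raise ValueError()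
--     return head + tail
-- ===== Notes on version B (the rewrite author's own statement) =====
-- stated objective: alternative
-- what changed: B builds the rotation in one forward pass with a found flag and two accumulators (head/tail), instead of first scanning for the index and then concatenating two slices.
import Mathlib
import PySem

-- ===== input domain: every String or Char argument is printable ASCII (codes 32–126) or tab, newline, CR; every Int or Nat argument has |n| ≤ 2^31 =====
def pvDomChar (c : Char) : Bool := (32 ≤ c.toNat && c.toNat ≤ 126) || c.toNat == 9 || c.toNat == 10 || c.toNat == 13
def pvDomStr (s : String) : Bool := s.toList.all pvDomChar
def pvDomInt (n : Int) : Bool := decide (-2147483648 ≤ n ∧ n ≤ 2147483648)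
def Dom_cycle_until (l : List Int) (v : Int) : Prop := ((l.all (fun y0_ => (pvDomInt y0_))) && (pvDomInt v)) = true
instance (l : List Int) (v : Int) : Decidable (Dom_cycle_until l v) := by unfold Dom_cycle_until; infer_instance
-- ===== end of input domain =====

-- B replaces A's find-index-then-slice with a single forward pass using a found flag
-- and two accumulators; equivalence is proved on Pre_ (v occurs in l); A raises ValueError
-- otherwise, and so does B.

-- ===== PORT A =====
-- the 'for i in range(len(l)) … break' search loop, carrying the running index i
def cycleFindA : List Int → Int → Int → Int
  | [], _, _ => -1
  | x :: xs, v, i => if x == v then i else cycleFindA xs v (i + 1)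

def cycle_until (l : List Int) (v : Int) : List Int :=
  let key_i := cycleFindA l v 0
  if key_i < 0 then []   -- Python raises ValueError here; excluded by Pre_cycle_until
  else PySem.List.slice l (some key_i) none ++ PySem.List.slice l none (some key_i)

-- ===== PORT B =====
-- the single pass: (found, head, tail) threaded through the loop
def cycleGoB : List Int → Int → Bool → List Int → List Int → (Bool × List Int × List Int)
  | [], _, found, head, tail => (found, head, tail)
  | x :: xs, v, found, head, tail =>
    if found || x == v then cycleGoB xs v true (head ++ [x]) tail
    else cycleGoB xs v found head (tail ++ [x])

def cycle_until_alt (l : List Int) (v : Int) : List Int :=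
  let r := cycleGoB l v false [] []
  if r.1 then r.2.1 ++ r.2.2 else []   -- Python raises ValueError in the else branch; excluded by Pre_cycle_until

-- ===== PRECONDITION & SPEC =====
-- Pre_ excludes exactly the inputs where v does not occur in l: there both A and B raise ValueError.
def Pre_cycle_until (l : List Int) (v : Int) : Prop := v ∈ l
instance (l : List Int) (v : Int) : Decidable (Pre_cycle_until l v) := by unfold Pre_cycle_until; infer_instance
def pvWitness_cycle_until : List Int × Int := ([3, 1, 4, 1, 5], 4)

def Spec_cycle_until (l : List Int) (v : Int) (out : List Int) : Prop := out = cycle_until_alt l v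
instance (l : List Int) (v : Int) (out : List Int) : Decidable (Spec_cycle_until l v out) := by unfold Spec_cycle_until; infer_instance

-- ===== CLAIM (what is proved, stated in full; the proofs are below) =====
def Claim_equal_cycle_until : Prop := ∀ (l : List Int) (v : Int), Dom_cycle_until l v → Pre_cycle_until l v → Spec_cycle_until l v (cycle_until l v)

-- ===== LEMMAS AND PROOFS =====

theorem cycleFindA_of_mem (l : List Int) (v : Int) (h : v ∈ l) (i : Int) :
    cycleFindA l v i = i + (l.findIdx (· == v) : Int) := by
  induction l generalizing i with
  | nil => cases h
  | cons x xs ih =>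
    by_cases hx : x = v
    · simp [cycleFindA, hx, List.findIdx_cons]
    · have hv : v ∈ xs := by
        cases h with
        | head => exact absurd rfl hx
        | tail _ h' => exact h'
      have hbeq : (x == v) = false := by simp [hx]
      simp only [cycleFindA, hbeq, List.findIdx_cons, cond_false]
      rw [ih hv]
      push_cast
      ring

theorem cycleGoB_found (xs : List Int) (v : Int) (head tail : List Int) :
    cycleGoB xs v true head tail = (true, head ++ xs, tail) := by
  induction xs generalizing head with
  | nil => simp [cycleGoB]
  | cons x xs ih => simp [cycleGoB, ih]

theorem cycleGoB_split (l : List Int) (v : Int) (h : v ∈ l) (tail : List Int) :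
    cycleGoB l v false [] tail =
      (true, l.drop (l.findIdx (· == v)), tail ++ l.take (l.findIdx (· == v))) := by
  induction l generalizing tail with
  | nil => cases h
  | cons x xs ih =>
    by_cases hx : x = v
    · have hbeq : (x == v) = true := by simp [hx]
      simp [cycleGoB, hbeq, cycleGoB_found, List.findIdx_cons]
    · have hv : v ∈ xs := by
        cases h with
        | head => exact absurd rfl hx
        | tail _ h' => exact h'
      have hbeq : (x == v) = false := by simp [hx]
      simp only [cycleGoB, hbeq, Bool.false_or, List.findIdx_cons, cond_false]
      rw [ih hv]
      simp

-- ===== VERDICT (by name: the statement is the Claim_ definition above) =====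
theorem cycle_until_spec : Claim_equal_cycle_until := by
  intro l v _ hmem
  unfold Spec_cycle_until cycle_until cycle_until_alt
  have hn : l.findIdx (· == v) < l.length := List.findIdx_lt_length_of_exists ⟨v, hmem, by simp⟩
  rw [cycleFindA_of_mem l v hmem 0, cycleGoB_split l v hmem []]
  simp only [zero_add]
  rw [if_neg (by omega), PySem.List.slice_from_natCast, PySem.List.slice_to_natCast]
  simp
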